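-- pv_equiv track=rewrite | github.com/benjaminingreens/liturgical_calendar | liturgical_calendar.py | combine_carried_over_readings
-- ===== SOURCE A (Python) =====
-- def combine_carried_over_readings(lexicon):
--     """Combine 'Carried Over Days' with existing days while keeping the day name unchanged."""
--     readings_by_date = {}
--
--     for entry in lexicon:
--         date, season, day_name, meditation, ot_reading, nt_reading = entry
--         if date not in readings_by_date:
--             readings_by_date[date] = {
--                 "season": season,
--                 "day_name": day_name,  # Keep the original day name
--                 "meditation": meditation,
--                 "ot_reading": ot_reading,
--                 "nt_reading": nt_reading,
--             }
--         else:
--             # Merge readings without modifying the day name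
--             if not readings_by_date[date]["nt_reading"] and nt_reading:
--                 readings_by_date[date]["nt_reading"] = nt_reading
--             if not readings_by_date[date]["ot_reading"] and ot_reading:
--                 readings_by_date[date]["ot_reading"] = ot_reading
--             if not readings_by_date[date]["meditation"] and meditation:
--                 readings_by_date[date]["meditation"] = meditation
--
--     # Reconstruct lexicon in sorted order by date
--     combined_lexicon = [
--         (
--             date,
--             values["season"],
--             values["day_name"],
--             values["meditation"],
--             values["ot_reading"],
--             values["nt_reading"],
--         )
--         for date, values in sorted(readings_by_date.items())
--     ]
--
--     return combined_lexicon
-- ===== SOURCE B (Python) =====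
-- def combine_carried_over_readings(lexicon):
--     """Combine 'Carried Over Days' with existing days while keeping the day name unchanged."""
--
--     def first_truthy(values):
--         return next((v for v in values if v), "")
--
--     result = []
--     for date in sorted({entry[0] for entry in lexicon}):
--         group = [entry for entry in lexicon if entry[0] == date]
--         _, season, day_name, _, _, _ = group[0]
--         result.append((
--             date,
--             season,
--             day_name,
--             first_truthy(entry[3] for entry in group),
--             first_truthy(entry[4] for entry in group),
--             first_truthy(entry[5] for entry in group),
--         ))
--     return result
-- ===== Notes on version B (the rewrite author's own statement) =====
-- stated objective: alternative
-- what changed: B replaces A's mutable dict-of-dicts merge followed by a separate sort of the items with a direct construction: it sorts the distinct dates once, then for each date filters its group and takes the group head's season/day_name and the first truthy value of each reading field.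
import Mathlib
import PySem

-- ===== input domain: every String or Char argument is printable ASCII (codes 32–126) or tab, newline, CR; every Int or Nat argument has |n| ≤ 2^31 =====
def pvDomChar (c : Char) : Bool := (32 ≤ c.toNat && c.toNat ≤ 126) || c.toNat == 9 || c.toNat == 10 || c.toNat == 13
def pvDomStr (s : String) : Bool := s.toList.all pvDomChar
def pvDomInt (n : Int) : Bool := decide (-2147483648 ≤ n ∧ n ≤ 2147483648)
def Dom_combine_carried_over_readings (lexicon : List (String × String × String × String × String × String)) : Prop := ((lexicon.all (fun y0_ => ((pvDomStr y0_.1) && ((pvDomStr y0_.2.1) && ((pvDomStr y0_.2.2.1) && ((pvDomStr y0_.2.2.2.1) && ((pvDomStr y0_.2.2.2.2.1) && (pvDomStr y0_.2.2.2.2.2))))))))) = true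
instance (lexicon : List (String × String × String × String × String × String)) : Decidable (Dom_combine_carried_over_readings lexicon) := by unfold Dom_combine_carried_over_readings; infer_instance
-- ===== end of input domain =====

-- B replaces A's mutable dict-of-dicts merge + separate sort with sorted-distinct-dates, then a per-date
-- group filter taking the first truthy value of each reading field (alternative decomposition, not faster).

-- ===== PORT A =====
-- record stored per date: (season, day_name, meditation, ot_reading, nt_reading)
-- the three sequential in-place field updates of A's else-branch
def pvMergeA (v : String × String × String × String × String)
    (e : String × String × String × String × String × String) :
    String × String × String × String × String :=
  let v1 := if v.2.2.2.2 == "" && e.2.2.2.2.2 != "" then (v.1, v.2.1, v.2.2.1, v.2.2.2.1, e.2.2.2.2.2) else v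
  let v2 := if v1.2.2.2.1 == "" && e.2.2.2.2.1 != "" then (v1.1, v1.2.1, v1.2.2.1, e.2.2.2.2.1, v1.2.2.2.2) else v1
  if v2.2.2.1 == "" && e.2.2.2.1 != "" then (v2.1, v2.2.1, e.2.2.2.1, v2.2.2.2.1, v2.2.2.2.2) else v2

def pvInitA (e : String × String × String × String × String × String) :
    String × String × String × String × String :=
  (e.2.1, e.2.2.1, e.2.2.2.1, e.2.2.2.2.1, e.2.2.2.2.2)

-- one loop iteration of A ('date not in readings_by_date' first, else merge; d[date] lookup = getD, key present)
def pvStepA (d : PySem.Dict String (String × String × String × String × String))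
    (e : String × String × String × String × String × String) :
    PySem.Dict String (String × String × String × String × String) :=
  if d.contains e.1 = false then d.insert e.1 (pvInitA e)
  else d.insert e.1 (pvMergeA (d.getD e.1 ("", "", "", "", "")) e)

-- sorted(readings_by_date.items()): Python compares the (date, value) tuples, but the dict's keys are
-- unique so only the dates are ever compared — ported as a sort keyed on the first component.
def combine_carried_over_readings (lexicon : List (String × String × String × String × String × String)) : List (String × String × String × String × String × String) :=
  let d := lexicon.foldl pvStepA PySem.Dict.empty
  (PySem.List.sorted d.items (fun p => p.1) false).map
    (fun p => (p.1, p.2.1, p.2.2.1, p.2.2.2.1, p.2.2.2.2.1, p.2.2.2.2.2))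

-- ===== PORT B =====
-- next((v for v in values if v), "")
def pvFirstTruthy (xs : List String) : String := (xs.find? (fun s => s != "")).getD ""

-- the record built for one date; the group is never empty (the date comes from the lexicon),
-- so the [] branch is unreachable
def pvRecB (date : String) (g : List (String × String × String × String × String × String)) :
    String × String × String × String × String × String :=
  match g with
  | [] => (date, "", "", "", "", "")
  | e :: _ =>
      (date, e.2.1, e.2.2.1,
       pvFirstTruthy (g.map (fun x => x.2.2.2.1)),
       pvFirstTruthy (g.map (fun x => x.2.2.2.2.1)),
       pvFirstTruthy (g.map (fun x => x.2.2.2.2.2)))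

def combine_carried_over_readings_alt (lexicon : List (String × String × String × String × String × String)) : List (String × String × String × String × String × String) :=
  (PySem.List.sorted (PySem.Set.ofList (lexicon.map (fun e => e.1))) (fun x => x) false).map
    (fun date => pvRecB date (lexicon.filter (fun e => e.1 == date)))

-- ===== PRECONDITION & SPEC =====
def Spec_combine_carried_over_readings (lexicon : List (String × String × String × String × String × String)) (out : List (String × String × String × String × String × String)) : Prop := out = combine_carried_over_readings_alt lexicon
instance (lexicon : List (String × String × String × String × String × String)) (out : List (String × String × String × String × String × String)) : Decidable (Spec_combine_carried_over_readings lexicon out) := by unfold Spec_combine_carried_over_readings; infer_instance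

-- ===== CLAIM (what is proved, stated in full; the proofs are below) =====
def Claim_equal_combine_carried_over_readings : Prop := ∀ (lexicon : List (String × String × String × String × String × String)), Dom_combine_carried_over_readings lexicon → Spec_combine_carried_over_readings lexicon (combine_carried_over_readings lexicon)

-- ===== LEMMAS AND PROOFS =====

-- 'fill an already-known field only if it is still empty'
def pvFill (c : String) (xs : List String) : String := if c = "" then pvFirstTruthy xs else c

lemma pvFirstTruthy_cons (x : String) (xs : List String) :
    pvFirstTruthy (x :: xs) = pvFill x xs := by
  by_cases h : x = "" <;> simp [pvFirstTruthy, pvFill, h]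

lemma pvMergeA_eq (v : String × String × String × String × String)
    (e : String × String × String × String × String × String) :
    pvMergeA v e = (v.1, v.2.1,
      (if v.2.2.1 = "" ∧ e.2.2.2.1 ≠ "" then e.2.2.2.1 else v.2.2.1),
      (if v.2.2.2.1 = "" ∧ e.2.2.2.2.1 ≠ "" then e.2.2.2.2.1 else v.2.2.2.1),
      (if v.2.2.2.2 = "" ∧ e.2.2.2.2.2 ≠ "" then e.2.2.2.2.2 else v.2.2.2.2)) := by
  obtain ⟨s, dn, m, ot, nt⟩ := v
  unfold pvMergeA
  by_cases h1 : nt = "" <;> by_cases h2 : ot = "" <;> by_cases h3 : m = "" <;>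
  by_cases g1 : e.2.2.2.2.2 = "" <;> by_cases g2 : e.2.2.2.2.1 = "" <;> by_cases g3 : e.2.2.2.1 = "" <;>
    simp [h1, h2, h3, g1, g2, g3]

lemma pvFill_step (c x : String) (xs : List String) :
    pvFill (if c = "" ∧ x ≠ "" then x else c) xs = pvFill c (x :: xs) := by
  by_cases hc : c = "" <;> by_cases hx : x = "" <;>
    simp [pvFill, pvFirstTruthy_cons, hc, hx]

lemma pvMergeA_foldl (g : List (String × String × String × String × String × String))
    (v : String × String × String × String × String) :
    g.foldl pvMergeA v =
      (v.1, v.2.1,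
       pvFill v.2.2.1 (g.map (fun x => x.2.2.2.1)),
       pvFill v.2.2.2.1 (g.map (fun x => x.2.2.2.2.1)),
       pvFill v.2.2.2.2 (g.map (fun x => x.2.2.2.2.2))) := by
  induction g generalizing v with
  | nil =>
      obtain ⟨s, dn, m, ot, nt⟩ := v
      by_cases h1 : m = "" <;> by_cases h2 : ot = "" <;> by_cases h3 : nt = "" <;>
        simp [pvFill, pvFirstTruthy, h1, h2, h3]
  | cons e t ih =>
      simp only [List.foldl_cons, ih, pvMergeA_eq, List.map_cons, pvFill_step]

-- the dict lookup after A's loop: first entry's season/day_name, fields merged left-to-right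
lemma pvGetA (l : List (String × String × String × String × String × String))
    (d : PySem.Dict String (String × String × String × String × String)) (k : String) :
    (l.foldl pvStepA d).get? k =
      match d.get? k with
      | some v => some ((l.filter (fun e => e.1 == k)).foldl pvMergeA v)
      | none =>
        match l.filter (fun e => e.1 == k) with
        | [] => none
        | e :: r => some (r.foldl pvMergeA (pvInitA e)) := by
  induction l generalizing d with
  | nil => cases hd : d.get? k <;> simp [hd]
  | cons e t ih =>
      simp only [List.foldl_cons, ih, List.filter_cons]
      by_cases hk : e.1 = k
      · subst hk
        cases hd : d.get? e.1 with
        | some v =>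
            have hc : d.contains e.1 = true := by
              rw [PySem.Dict.contains_eq_isSome_get?, hd]; rfl
            simp [pvStepA, hc, PySem.Dict.get?_insert_self,
              PySem.Dict.getD_eq_get?_getD, hd]
        | none =>
            have hc : d.contains e.1 = false := by
              rw [PySem.Dict.contains_eq_isSome_get?, hd]; rfl
            simp [pvStepA, hc, PySem.Dict.get?_insert_self]
      · have hne : ¬ (e.1 == k) = true := by simp [hk]
        have hget : (pvStepA d e).get? k = d.get? k := by
          unfold pvStepA
          by_cases hc : d.contains e.1 = false <;>
            simp [hc, PySem.Dict.get?_insert, Ne.symm hk]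
        simp [hne, hget]

lemma pvStepA_insert_form :
    pvStepA = fun d e => d.insert e.1
      (if d.contains e.1 then pvMergeA (d.getD e.1 ("", "", "", "", "")) e else pvInitA e) := by
  funext d e
  unfold pvStepA
  by_cases hc : d.contains e.1 <;> simp [hc]

lemma pvKeysA (l : List (String × String × String × String × String × String)) :
    (l.foldl pvStepA PySem.Dict.empty).keys = PySem.Set.ofList (l.map (fun e => e.1)) := by
  rw [pvStepA_insert_form]
  exact PySem.Dict.keys_foldl_insert_key l (fun e => e.1) _ PySem.Dict.empty

lemma pvNodupKeysA (l : List (String × String × String × String × String × String)) :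
    (l.foldl pvStepA PySem.Dict.empty).keys.Nodup := by
  rw [pvStepA_insert_form]
  exact PySem.Dict.nodup_keys_foldl_insert_key l (fun e => e.1) _ PySem.Dict.empty
    PySem.Dict.nodup_keys_empty

-- the merged record A holds for a date, read off from that date's group
def pvValA (l : List (String × String × String × String × String × String)) (k : String) :
    String × String × String × String × String :=
  match l.filter (fun e => e.1 == k) with
  | [] => ("", "", "", "", "")
  | e :: r => r.foldl pvMergeA (pvInitA e)

lemma pvGetDA (l : List (String × String × String × String × String × String)) (k : String) :
    (l.foldl pvStepA PySem.Dict.empty).getD k ("", "", "", "", "") = pvValA l k := by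
  rw [PySem.Dict.getD_eq_get?_getD, pvGetA]
  simp only [PySem.Dict.get?_empty]
  unfold pvValA
  cases l.filter (fun e => e.1 == k) <;> rfl

lemma pvItemsA (l : List (String × String × String × String × String × String)) :
    (l.foldl pvStepA PySem.Dict.empty).items =
      (PySem.Set.ofList (l.map (fun e => e.1))).map (fun k => (k, pvValA l k)) := by
  rw [PySem.Dict.items_eq_map_keys _ (pvNodupKeysA l) ("", "", "", "", ""), pvKeysA]
  exact List.map_congr_left (fun k _ => by rw [pvGetDA])

lemma pvSortA (l : List (String × String × String × String × String × String)) :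
    PySem.List.sorted ((PySem.Set.ofList (l.map (fun e => e.1))).map (fun k => (k, pvValA l k)))
        (fun p => p.1) false =
      (PySem.List.sorted (PySem.Set.ofList (l.map (fun e => e.1))) (fun x => x) false).map
        (fun k => (k, pvValA l k)) := by
  apply PySem.List.sorted_eq_of_perm_of_pairwise_lt
  · exact (PySem.List.sorted_perm _ _ _).map _
  · exact List.Pairwise.map _ (fun a b h => h)
      (PySem.List.sorted_ofList_pairwise_lt (l.map (fun e => e.1)))

-- ===== VERDICT (by name: the statement is the Claim_ definition above) =====
theorem combine_carried_over_readings_spec : Claim_equal_combine_carried_over_readings := by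
  intro lexicon _
  unfold Spec_combine_carried_over_readings combine_carried_over_readings combine_carried_over_readings_alt
  simp only [pvItemsA, pvSortA, List.map_map]
  apply List.map_congr_left
  intro k hk
  have hk' : k ∈ lexicon.map (fun e => e.1) := by
    simp only [PySem.List.mem_sorted, PySem.Set.mem_ofList] at hk
    exact hk
  have hne : lexicon.filter (fun e => e.1 == k) ≠ [] := by
    obtain ⟨e, he, hek⟩ := List.mem_map.1 hk'
    intro hnil
    have : e ∈ lexicon.filter (fun e => e.1 == k) := by
      rw [List.mem_filter]; exact ⟨he, by simp [hek]⟩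
    simp [hnil] at this
  cases hg : lexicon.filter (fun e => e.1 == k) with
  | nil => exact absurd hg hne
  | cons e r =>
      simp only [Function.comp_apply, pvValA, hg, pvRecB, pvMergeA_foldl, pvInitA,
        List.map_cons, pvFirstTruthy_cons]
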